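-- pv_equiv track=rewrite | github.com/lacg/wnn | tests/code_completion.py | tokenize_python
-- ===== SOURCE A (Python) =====
-- def tokenize_python(code: str) -> list[str]:
-- 	"""Simple Python tokenizer."""
-- 	# Add spaces around operators and punctuation
-- 	for op in ['(', ')', '[', ']', '{', '}', ':', ',', '.', '=', '+', '-',
-- 				 '*', '/', '<', '>', '!', '@', '#', '%', '&', '|', '^', '~']:
-- 		code = code.replace(op, f' {op} ')
-- 	# Handle multi-char operators
-- 	code = code.replace('= =', '==').replace('! =', '!=')
-- 	code = code.replace('< =', '<=').replace('> =', '>=')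
-- 	code = code.replace('+ =', '+=').replace('- =', '-=')
-- 	# Split and filter
-- 	tokens = [t.strip() for t in code.split() if t.strip()]
-- 	return tokens
-- ===== SOURCE B (Python) =====
-- _OPS = set('()[]{}:,.=+-*/<>!@#%&|^~')
--
-- def tokenize_python(code: str) -> list[str]:
--     """Simple Python tokenizer: single left-to-right scan."""
--     tokens = []
--     buf = []
--     for ch in code:
--         if ch.isspace():
--             if buf:
--                 tokens.append(''.join(buf))
--                 buf = []
--         elif ch in _OPS:
--             if buf:
--                 tokens.append(''.join(buf))
--                 buf = []
--             tokens.append(ch)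
--         else:
--             buf.append(ch)
--     if buf:
--         tokens.append(''.join(buf))
--     return tokens
-- ===== Notes on version B (the rewrite author's own statement) =====
-- stated objective: simpler
-- what changed: Replaced A's 30 whole-string replace passes plus a split/strip/filter pass (whose six multi-char merge replacements can never fire) by a single left-to-right character scan with a token buffer.
import Mathlib
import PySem

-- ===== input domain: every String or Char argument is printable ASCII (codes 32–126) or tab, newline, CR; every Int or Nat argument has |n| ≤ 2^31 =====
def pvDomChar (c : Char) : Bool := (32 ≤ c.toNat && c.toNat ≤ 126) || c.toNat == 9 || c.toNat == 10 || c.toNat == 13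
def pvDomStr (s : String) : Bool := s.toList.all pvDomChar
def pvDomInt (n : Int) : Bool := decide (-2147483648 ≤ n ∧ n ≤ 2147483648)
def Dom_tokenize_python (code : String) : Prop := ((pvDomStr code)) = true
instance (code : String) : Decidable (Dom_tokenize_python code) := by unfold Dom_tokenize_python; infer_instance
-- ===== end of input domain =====

-- B (objective: simpler) replaces A's 31 whole-string passes (24 replace passes, 6 merge passes
-- that never fire, split/strip/filter) by one left-to-right character scan with a token buffer.

-- ===== PORT A =====
def pvOpsA : List String := ["(", ")", "[", "]", "{", "}", ":", ",", ".", "=", "+", "-",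
  "*", "/", "<", ">", "!", "@", "#", "%", "&", "|", "^", "~"]

def tokenize_python (code : String) : List String :=
  let code1 := pvOpsA.foldl
    (fun s op => PySem.Str.replace s op (String.ofList (' ' :: (op.toList ++ [' '])))) code
  let code2 := PySem.Str.replace (PySem.Str.replace code1 "= =" "==") "! =" "!="
  let code3 := PySem.Str.replace (PySem.Str.replace code2 "< =" "<=") "> =" ">="
  let code4 := PySem.Str.replace (PySem.Str.replace code3 "+ =" "+=") "- =" "-="
  ((PySem.Str.split₀ code4).filter (fun t => !(PySem.Str.strip t).toList.isEmpty)).map PySem.Str.strip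

-- ===== PORT B =====
def pvOpChars : List Char := ['(', ')', '[', ']', '{', '}', ':', ',', '.', '=', '+', '-',
  '*', '/', '<', '>', '!', '@', '#', '%', '&', '|', '^', '~']

def pvFlush (buf : List Char) : List String :=
  if buf.isEmpty then [] else [String.ofList buf]

def pvScan : List Char → List Char → List String
  | [], buf => pvFlush buf
  | c :: rest, buf =>
    if PySem.Chars.isspace c then pvFlush buf ++ pvScan rest []
    else if pvOpChars.contains c then pvFlush buf ++ (String.ofList [c] :: pvScan rest [])
    else pvScan rest (buf ++ [c])

def tokenize_python_alt (code : String) : List String := pvScan code.toList []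


-- ===== PRECONDITION & SPEC =====
def Spec_tokenize_python (code : String) (out : List String) : Prop := out = tokenize_python_alt code
instance (code : String) (out : List String) : Decidable (Spec_tokenize_python code out) := by unfold Spec_tokenize_python; infer_instance

-- ===== CLAIM (what is proved, stated in full; the proofs are below) =====
def Claim_equal_tokenize_python : Prop := ∀ (code : String), Dom_tokenize_python code → Spec_tokenize_python code (tokenize_python code)

-- ===== LEMMAS AND PROOFS =====

def pvExp (c : Char) : List Char := if pvOpChars.contains c then [' ', c, ' '] else [c]

def pvExpP (done : List Char) (c : Char) : List Char :=
  if done.contains c then [' ', c, ' '] else [c]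

theorem pv_ops_nodup : pvOpChars.Nodup := by simp [pvOpChars]

theorem pv_ops_ne_space_all : pvOpChars.all (fun c => decide (c ≠ ' ')) = true := by rfl

theorem pv_ops_ne_space : ∀ c ∈ pvOpChars, c ≠ ' ' := by
  intro c hc; exact of_decide_eq_true (List.all_eq_true.mp pv_ops_ne_space_all c hc)

theorem pv_ops_not_space_all : pvOpChars.all (fun c => !PySem.Chars.isspace c) = true := by rfl

theorem pv_ops_not_space : ∀ c ∈ pvOpChars, PySem.Chars.isspace c = false := by
  intro c hc; simpa using List.all_eq_true.mp pv_ops_not_space_all c hc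

theorem pv_go_single (c : Char) (new : List Char) :
    ∀ (fuel : Nat) (l acc : List Char), l.length ≤ fuel →
      PySem.Chars.replace.go [c] new fuel l acc
        = acc.reverse ++ l.flatMap (fun x => if x = c then new else [x]) := by
  intro fuel
  induction fuel with
  | zero =>
    intro l acc h
    have : l = [] := List.eq_nil_of_length_eq_zero (Nat.le_zero.mp h)
    subst this
    simp [PySem.Chars.replace.go]
  | succ n ih =>
    intro l acc h
    cases l with
    | nil => simp [PySem.Chars.replace.go]
    | cons a t =>
      simp only [PySem.Chars.replace.go]
      by_cases hac : a = c
      · subst hac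
        have hpre : List.isPrefixOf [a] (a :: t) = true := by
          simp [List.isPrefixOf_iff_prefix]
        simp only [hpre, if_true, List.length_cons, List.length_nil, List.drop_succ_cons,
          List.drop_zero]
        rw [ih t (new.reverse ++ acc) (by simpa using Nat.le_of_succ_le_succ h)]
        simp
      · have hpre : List.isPrefixOf [c] (a :: t) = false := by
          rw [Bool.eq_false_iff]
          intro hb
          rcases List.cons_prefix_cons.mp ((List.isPrefixOf_iff_prefix).mp hb) with ⟨he, _⟩
          exact hac he.symm
        simp only [hpre, if_false, Bool.false_eq_true]
        rw [ih t (a :: acc) (by simpa using Nat.le_of_succ_le_succ h)]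
        simp [hac]

theorem pv_replace_single (s : List Char) (c : Char) (new : List Char) :
    PySem.Chars.replace s [c] new = s.flatMap (fun x => if x = c then new else [x]) := by
  simp only [PySem.Chars.replace, List.isEmpty_cons, Bool.false_eq_true, if_false]
  simpa using pv_go_single c new s.length s [] le_rfl

theorem pv_go_noocc (old new : List Char) :
    ∀ (fuel : Nat) (l acc : List Char), l.length ≤ fuel →
      (∀ j, ¬ old <+: l.drop j) →
      PySem.Chars.replace.go old new fuel l acc = acc.reverse ++ l := by
  intro fuel
  induction fuel with
  | zero =>
    intro l acc h _
    have : l = [] := List.eq_nil_of_length_eq_zero (Nat.le_zero.mp h)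
    subst this
    simp [PySem.Chars.replace.go]
  | succ n ih =>
    intro l acc h hno
    cases l with
    | nil => simp [PySem.Chars.replace.go]
    | cons a t =>
      have hpre : List.isPrefixOf old (a :: t) = false := by
        rw [Bool.eq_false_iff]
        intro hb
        exact hno 0 (by simpa using (List.isPrefixOf_iff_prefix).mp hb)
      simp only [PySem.Chars.replace.go, hpre, if_false, Bool.false_eq_true]
      rw [ih t (a :: acc) (by simpa using Nat.le_of_succ_le_succ h)
        (fun j => by simpa using hno (j + 1))]
      simp

theorem pv_replace_noocc (s old new : List Char) (hne : old ≠ [])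
    (h : ∀ j, ¬ old <+: s.drop j) :
    PySem.Chars.replace s old new = s := by
  have hie : old.isEmpty = false := by simpa [List.isEmpty_iff]
  simp only [PySem.Chars.replace, hie, Bool.false_eq_true, if_false]
  simpa using pv_go_noocc old new s.length s [] le_rfl h

theorem pv_fold_expand :
    ∀ (ops done : List Char) (s : List Char), (done ++ ops).Nodup →
      (∀ c ∈ ops, c ∈ pvOpChars) →
      ops.foldl (fun t c => PySem.Chars.replace t [c] [' ', c, ' ']) (s.flatMap (pvExpP done))
        = s.flatMap (pvExpP (done ++ ops)) := by
  intro ops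
  induction ops with
  | nil => intro done s _ _; simp
  | cons c ops' ih =>
    intro done s hnd hops
    have hc : c ∈ pvOpChars := hops c (by simp)
    have hcs : c ≠ ' ' := pv_ops_ne_space c hc
    have hcd : c ∉ done := by
      intro hmem
      exact List.disjoint_of_nodup_append hnd hmem (by simp)
    have hstep : PySem.Chars.replace (s.flatMap (pvExpP done)) [c] [' ', c, ' ']
        = s.flatMap (pvExpP (done ++ [c])) := by
      rw [pv_replace_single, List.flatMap_assoc]
      apply List.flatMap_congr
      intro x _
      by_cases hxd : x ∈ done
      · have hxc : x ≠ c := fun he => hcd (he ▸ hxd)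
        simp [pvExpP, hxd, hxc, Ne.symm hcs]
      · by_cases hxc : x = c
        · subst hxc
          simp [pvExpP, hxd, Ne.symm hcs]
        · simp [pvExpP, hxd, hxc]
    rw [List.foldl_cons, hstep,
      ih (done ++ [c]) s (by simpa using hnd) (fun d hd => hops d (by simp [hd]))]
    congr 1
    funext x
    simp [pvExpP]

theorem pv_eq_mem : '=' ∈ pvOpChars := by simp [pvOpChars]

theorem pv_headNe (l : List Char) : ¬ ['='] <+: l.flatMap pvExp := by
  cases l with
  | nil => simp
  | cons x l' =>
    by_cases hx : x ∈ pvOpChars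
    · have hss : ' ' ≠ '=' := by decide
      have hxb : pvOpChars.contains x = true := by simpa using hx
      simp only [pvExp, List.flatMap_cons, hxb, if_true, List.cons_append]
      intro hp
      exact hss (List.cons_prefix_cons.mp hp).1.symm
    · have hxe : x ≠ '=' := fun he => hx (he ▸ pv_eq_mem)
      have hxb : pvOpChars.contains x = false := by simpa using hx
      simp only [pvExp, List.flatMap_cons, hxb, Bool.false_eq_true, if_false, List.cons_append,
        List.nil_append]
      intro hp
      exact hxe (List.cons_prefix_cons.mp hp).1.symm

theorem pv_noPat (c : Char) (hc : c ∈ pvOpChars) :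
    ∀ (l : List Char) (j : Nat), ¬ [c, ' ', '='] <+: (l.flatMap pvExp).drop j := by
  have hcs : c ≠ ' ' := pv_ops_ne_space c hc
  intro l
  induction l with
  | nil => intro j; simp
  | cons x l' ih =>
    intro j
    by_cases hx : x ∈ pvOpChars
    · have hE : (x :: l').flatMap pvExp = ' ' :: x :: ' ' :: l'.flatMap pvExp := by
        simp [pvExp, hx]
      rw [hE]
      match j with
      | 0 =>
        intro hp
        exact hcs (List.cons_prefix_cons.mp hp).1
      | 1 =>
        simp only [List.drop_succ_cons, List.drop_zero]
        intro hp
        rcases List.cons_prefix_cons.mp hp with ⟨_, hp2⟩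
        rcases List.cons_prefix_cons.mp hp2 with ⟨_, hp3⟩
        exact pv_headNe l' hp3
      | 2 =>
        simp only [List.drop_succ_cons, List.drop_zero]
        intro hp
        exact hcs (List.cons_prefix_cons.mp hp).1
      | (n+3) => simpa using ih n
    · have hE : (x :: l').flatMap pvExp = x :: l'.flatMap pvExp := by
        simp [pvExp, hx]
      rw [hE]
      match j with
      | 0 =>
        intro hp
        exact hx ((List.cons_prefix_cons.mp hp).1 ▸ hc)
      | (n+1) => simpa using ih n

theorem pv_merge_id (c : Char) (hc : c ∈ pvOpChars) (l : List Char) (new : List Char) :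
    PySem.Chars.replace (l.flatMap pvExp) [c, ' ', '='] new = l.flatMap pvExp :=
  pv_replace_noocc _ _ _ (by simp) (pv_noPat c hc l)

theorem pv_space_isspace : PySem.Chars.isspace ' ' = true := by decide

theorem pv_sgo_nil (cur : List Char) (acc : List (List Char)) :
    PySem.Chars.split₀.go [] cur acc
      = if cur.isEmpty then acc.reverse else (cur.reverse :: acc).reverse := rfl

theorem pv_sgo_cons (c : Char) (rest cur : List Char) (acc : List (List Char)) :
    PySem.Chars.split₀.go (c :: rest) cur acc
      = if PySem.Chars.isspace c then
          (if cur.isEmpty then PySem.Chars.split₀.go rest [] acc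
           else PySem.Chars.split₀.go rest [] (cur.reverse :: acc))
        else PySem.Chars.split₀.go rest (c :: cur) acc := by
  simp [PySem.Chars.split₀.go]

theorem pv_split_scan :
    ∀ (l cur : List Char) (acc : List (List Char)),
      (PySem.Chars.split₀.go (l.flatMap pvExp) cur acc).map String.ofList
        = acc.reverse.map String.ofList ++ pvScan l cur.reverse := by
  intro l
  induction l with
  | nil =>
    intro cur acc
    cases cur with
    | nil => simp [pv_sgo_nil, pvScan, pvFlush]
    | cons a t => simp [pv_sgo_nil, pvScan, pvFlush]
  | cons x l' ih =>
    intro cur acc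
    by_cases hx : x ∈ pvOpChars
    · have hxs : PySem.Chars.isspace x = false := pv_ops_not_space x hx
      have hE : (x :: l').flatMap pvExp = ' ' :: x :: ' ' :: l'.flatMap pvExp := by
        simp [pvExp, hx]
      rw [hE, pv_sgo_cons, pv_space_isspace]
      simp only [reduceIte]
      have hrest : ∀ acc',
          (PySem.Chars.split₀.go (x :: ' ' :: l'.flatMap pvExp) [] acc').map String.ofList
            = acc'.reverse.map String.ofList ++ (String.ofList [x] :: pvScan l' []) := by
        intro acc'
        rw [pv_sgo_cons, hxs]
        simp only [Bool.false_eq_true, reduceIte, List.isEmpty_nil]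
        rw [pv_sgo_cons, pv_space_isspace]
        simp only [reduceIte, List.isEmpty_cons, Bool.false_eq_true, List.reverse_cons,
          List.reverse_nil, List.nil_append]
        rw [ih [] ([x] :: acc')]
        simp
      cases cur with
      | nil =>
        simp only [List.isEmpty_nil, reduceIte]
        rw [hrest acc]
        simp [pvScan, pvFlush, hxs, hx]
      | cons a t =>
        simp only [List.isEmpty_cons, Bool.false_eq_true, reduceIte]
        rw [hrest ((a :: t).reverse :: acc)]
        simp [pvScan, pvFlush, hxs, hx]
    · have hE : (x :: l').flatMap pvExp = x :: l'.flatMap pvExp := by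
        simp [pvExp, hx]
      rw [hE, pv_sgo_cons]
      by_cases hxs : PySem.Chars.isspace x = true
      · rw [hxs]
        simp only [reduceIte]
        cases cur with
        | nil =>
          simp only [List.isEmpty_nil, reduceIte]
          rw [ih [] acc]
          simp [pvScan, pvFlush, hxs]
        | cons a t =>
          simp only [List.isEmpty_cons, Bool.false_eq_true, reduceIte]
          rw [ih [] ((a :: t).reverse :: acc)]
          simp [pvScan, pvFlush, hxs]
      · have hxs' : PySem.Chars.isspace x = false := by simpa using hxs
        rw [hxs']
        simp only [Bool.false_eq_true, reduceIte]
        rw [ih (x :: cur) acc]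
        simp [pvScan, hxs', hx]

theorem pv_tokens :
    ∀ (s cur : List Char) (acc : List (List Char)),
      (∀ t ∈ acc, t ≠ [] ∧ t.all (fun c => !PySem.Chars.isspace c) = true) →
      cur.all (fun c => !PySem.Chars.isspace c) = true →
      ∀ t ∈ PySem.Chars.split₀.go s cur acc,
        t ≠ [] ∧ t.all (fun c => !PySem.Chars.isspace c) = true := by
  intro s
  induction s with
  | nil =>
    intro cur acc hacc hcur t ht
    rw [pv_sgo_nil] at ht
    cases cur with
    | nil => simp at ht; exact hacc t (by simpa using ht)
    | cons a u =>
      simp only [List.isEmpty_cons, Bool.false_eq_true, if_false, List.reverse_cons] at ht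
      rcases (by simpa using ht : t ∈ acc ∨ t = (a :: u).reverse) with h | h
      · exact hacc t h
      · subst h
        refine ⟨by simp, by rw [List.all_reverse]; exact hcur⟩
  | cons c rest ih =>
    intro cur acc hacc hcur t ht
    rw [pv_sgo_cons] at ht
    by_cases hc : PySem.Chars.isspace c = true
    · rw [hc] at ht
      simp only [eq_self_iff_true, if_true] at ht
      cases cur with
      | nil =>
        exact ih [] acc hacc (by simp) t (by simpa using ht)
      | cons a u =>
        simp only [List.isEmpty_cons, Bool.false_eq_true, if_false] at ht
        refine ih [] ((a :: u).reverse :: acc) ?_ (by simp) t ht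
        intro t' ht'
        rcases List.mem_cons.mp ht' with h | h
        · subst h; exact ⟨by simp, by rw [List.all_reverse]; exact hcur⟩
        · exact hacc t' h
    · have hc' : PySem.Chars.isspace c = false := by simpa using hc
      rw [hc'] at ht
      simp only [Bool.false_eq_true, if_false] at ht
      refine ih (c :: cur) acc hacc ?_ t ht
      simp [hcur, hc']

theorem pv_strip_id (t : List Char) (h : t.all (fun c => !PySem.Chars.isspace c) = true) :
    PySem.Chars.strip t = t := by
  have hl : ∀ (u : List Char), u.all (fun c => !PySem.Chars.isspace c) = true →
      u.dropWhile PySem.Chars.isspace = u := by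
    intro u hu
    cases u with
    | nil => rfl
    | cons a v =>
      have : PySem.Chars.isspace a = false := by
        have := List.all_eq_true.mp hu a (by simp)
        simpa using this
      simp [List.dropWhile_cons, this]
  simp only [PySem.Chars.strip, PySem.Chars.lstrip, PySem.Chars.rstrip]
  rw [hl t h]
  rw [hl t.reverse (by simpa using h)]
  simp

theorem pv_post :
    ∀ (ts : List (List Char)),
      (∀ t ∈ ts, t ≠ [] ∧ t.all (fun c => !PySem.Chars.isspace c) = true) →
      ((ts.map String.ofList).filter (fun t => !(PySem.Str.strip t).toList.isEmpty)).map PySem.Str.strip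
        = ts.map String.ofList := by
  intro ts
  induction ts with
  | nil => intro _; simp
  | cons t ts' ih =>
    intro h
    rcases h t (by simp) with ⟨hne, hall⟩
    have hstrip : PySem.Str.strip (String.ofList t) = String.ofList t := by
      rw [← String.toList_inj]
      rw [PySem.Str.toList_strip]
      simp only [String.toList_ofList]
      exact pv_strip_id t hall
    have hpred : (!(String.ofList t).toList.isEmpty) = true := by
      simpa [String.toList_ofList, List.isEmpty_iff] using hne
    simp only [List.map_cons, List.filter_cons, hstrip, hpred, eq_self_iff_true, if_true]
    rw [ih (fun t' ht' => h t' (by simp [ht']))]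

theorem pv_strfold :
    ∀ (ops : List Char) (s : String),
      (ops.foldl (fun t c => PySem.Str.replace t (String.ofList [c])
          (String.ofList (' ' :: ((String.ofList [c]).toList ++ [' '])))) s).toList
        = ops.foldl (fun t c => PySem.Chars.replace t [c] [' ', c, ' ']) s.toList := by
  intro ops
  induction ops with
  | nil => intro s; rfl
  | cons c ops' ih =>
    intro s
    rw [List.foldl_cons, List.foldl_cons, ih]
    congr 1
    rw [PySem.Str.toList_replace]
    simp [String.toList_ofList]

theorem pv_opsA_eq : pvOpsA = pvOpChars.map (fun c => String.ofList [c]) := by rfl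

theorem pv_expand_all (code : String) :
    ((pvOpsA.foldl (fun s op =>
        PySem.Str.replace s op (String.ofList (' ' :: (op.toList ++ [' '])))) code)).toList
      = code.toList.flatMap pvExp := by
  rw [pv_opsA_eq, List.foldl_map, pv_strfold]
  have h := pv_fold_expand pvOpChars [] code.toList (by simpa using pv_ops_nodup)
    (fun c hc => hc)
  simp only [List.nil_append] at h
  rw [show pvExpP [] = fun c => [c] from funext fun c => rfl] at h
  rw [show code.toList.flatMap (fun c => [c]) = code.toList from List.flatMap_singleton' _] at h
  rw [h]
  rfl

theorem pv_merge_str (code : String) (s : String) (c : Char) (hc : c ∈ pvOpChars)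
    (hs : s.toList = code.toList.flatMap pvExp) (pat rep : String)
    (hpat : pat.toList = [c, ' ', '=']) :
    (PySem.Str.replace s pat rep).toList = code.toList.flatMap pvExp := by
  rw [PySem.Str.toList_replace, hs, hpat, pv_merge_id c hc]

theorem pv_main (code : String) : tokenize_python code = tokenize_python_alt code := by
  have h1 := pv_expand_all code
  have hmem : ∀ c ∈ ['=', '!', '<', '>', '+', '-'], c ∈ pvOpChars := by
    simp [pvOpChars]
  have h2 := pv_merge_str code _ '=' (hmem '=' (by simp)) h1 "= =" "==" rfl
  have h3 := pv_merge_str code _ '!' (hmem '!' (by simp)) h2 "! =" "!=" rfl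
  have h4 := pv_merge_str code _ '<' (hmem '<' (by simp)) h3 "< =" "<=" rfl
  have h5 := pv_merge_str code _ '>' (hmem '>' (by simp)) h4 "> =" ">=" rfl
  have h6 := pv_merge_str code _ '+' (hmem '+' (by simp)) h5 "+ =" "+=" rfl
  have h7 := pv_merge_str code _ '-' (hmem '-' (by simp)) h6 "- =" "-=" rfl
  have hts := pv_tokens (code.toList.flatMap pvExp) [] [] (by simp) (by simp)
  show (((PySem.Str.split₀ _).filter _).map _) = _
  rw [show ∀ (z : String), PySem.Str.split₀ z = (PySem.Chars.split₀ z.toList).map String.ofList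
      from fun z => rfl]
  rw [h7]
  rw [pv_post (PySem.Chars.split₀ (code.toList.flatMap pvExp)) hts]
  have hscan := pv_split_scan code.toList [] []
  simp only [List.reverse_nil, List.map_nil, List.nil_append] at hscan
  rw [show PySem.Chars.split₀ (code.toList.flatMap pvExp)
      = PySem.Chars.split₀.go (code.toList.flatMap pvExp) [] [] from rfl] at *
  rw [hscan]
  rfl

-- ===== VERDICT (by name: the statement is the Claim_ definition above) =====
theorem tokenize_python_spec : Claim_equal_tokenize_python := by
  intro code _
  unfold Spec_tokenize_python
  exact pv_main code
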